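-- pv_equiv track=rewrite | github.com/LeeFischman/ai-research-atlas-staging | update_map.py | compute_author_seniority
-- ===== SOURCE A (Python) =====
-- ESTABLISHED_CITATIONS = 1000
--
-- ESTABLISHED_WORKS     = 50
--
-- EMERGING_CITATIONS    = 100
--
-- EMERGING_WORKS        = 10
--
-- def compute_author_seniority(author_ids: list, stats: dict) -> str:
--     """
--     Return the seniority tier of the most senior author on a paper.
--     Tiers: Established > Emerging > Unknown.
--     """
--     if not author_ids or not stats:
--         return "Unknown"
--
--     best = "Unknown"
--     for aid in author_ids:
--         s = stats.get(aid)
--         if not s: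
--             continue
--         if (s["cited_by_count"] >= ESTABLISHED_CITATIONS or
--                 s["works_count"] >= ESTABLISHED_WORKS):
--             return "Established"   # can't do better — short-circuit
--         if (s["cited_by_count"] >= EMERGING_CITATIONS or
--                 s["works_count"] >= EMERGING_WORKS):
--             best = "Emerging"
--
--     return best
-- ===== SOURCE B (Python) =====
-- ESTABLISHED_CITATIONS = 1000
-- ESTABLISHED_WORKS     = 50
-- EMERGING_CITATIONS    = 100
-- EMERGING_WORKS        = 10
--
-- def _meets(s, citations, works):
--     return s["cited_by_count"] >= citations or s["works_count"] >= works
--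
-- def compute_author_seniority(author_ids: list, stats: dict) -> str:
--     if not author_ids or not stats:
--         return "Unknown"
--     present = [stats[a] for a in author_ids if stats.get(a)]
--     if any(_meets(s, ESTABLISHED_CITATIONS, ESTABLISHED_WORKS) for s in present):
--         return "Established"
--     if any(_meets(s, EMERGING_CITATIONS, EMERGING_WORKS) for s in present):
--         return "Emerging"
--     return "Unknown"
-- ===== Notes on version B (the rewrite author's own statement) =====
-- stated objective: idiomatic
-- what changed: Replaces A's single stateful loop (carrying a 'best' variable with early return) by first collecting the present truthy stats and then two short-circuiting any() scans, one per tier.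
import Mathlib
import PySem

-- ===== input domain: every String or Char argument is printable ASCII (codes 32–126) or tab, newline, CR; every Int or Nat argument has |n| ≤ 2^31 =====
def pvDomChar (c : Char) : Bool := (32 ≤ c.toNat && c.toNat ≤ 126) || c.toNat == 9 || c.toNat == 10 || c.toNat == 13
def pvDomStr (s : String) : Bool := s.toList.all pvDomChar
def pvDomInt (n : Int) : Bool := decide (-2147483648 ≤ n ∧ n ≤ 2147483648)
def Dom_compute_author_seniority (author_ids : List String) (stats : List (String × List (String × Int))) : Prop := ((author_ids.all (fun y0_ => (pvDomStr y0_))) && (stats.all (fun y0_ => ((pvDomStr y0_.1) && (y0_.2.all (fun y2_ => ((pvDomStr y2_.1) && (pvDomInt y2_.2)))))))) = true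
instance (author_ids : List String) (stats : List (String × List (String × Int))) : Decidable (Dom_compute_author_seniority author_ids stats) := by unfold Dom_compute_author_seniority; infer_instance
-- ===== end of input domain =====

-- B is a simpler decomposition: two short-circuiting any-scans over the present stats instead of
-- A's stateful loop carrying 'best'; equivalence of return values is proved on Pre_ (keys present).


-- ===== PORT A =====
-- s["cited_by_count"] / s["works_count"] are ported with getD 0; Pre_ guarantees both keys are
-- present wherever they are read, so getD equals the Python indexing there (KeyError is excluded by Pre_).
def pvA_loop (stats : PySem.Dict String (List (String × Int))) : List String → String → String
  | [], best => best
  | aid :: rest, best =>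
    match stats.get? aid with
    | none => pvA_loop stats rest best
    | some s =>
      if s = [] then pvA_loop stats rest best
      else if (PySem.Dict.getD ⟨s⟩ "cited_by_count" 0 ≥ 1000) ∨ (PySem.Dict.getD ⟨s⟩ "works_count" 0 ≥ 50) then "Established"
      else if (PySem.Dict.getD ⟨s⟩ "cited_by_count" 0 ≥ 100) ∨ (PySem.Dict.getD ⟨s⟩ "works_count" 0 ≥ 10) then pvA_loop stats rest "Emerging"
      else pvA_loop stats rest best

def compute_author_seniority (author_ids : List String) (stats : List (String × List (String × Int))) : String :=
  if author_ids = [] ∨ stats = [] then "Unknown"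
  else pvA_loop ⟨stats⟩ author_ids "Unknown"

-- ===== PORT B =====
def pvB_meets (s : List (String × Int)) (citations works : Int) : Bool :=
  decide (PySem.Dict.getD ⟨s⟩ "cited_by_count" 0 ≥ citations) || decide (PySem.Dict.getD ⟨s⟩ "works_count" 0 ≥ works)

-- [stats[a] for a in author_ids if stats.get(a)]
def pvB_present (author_ids : List String) (stats : PySem.Dict String (List (String × Int))) : List (List (String × Int)) :=
  author_ids.filterMap (fun a =>
    match stats.get? a with
    | some s => if s = [] then none else some s
    | none => none)

def compute_author_seniority_alt (author_ids : List String) (stats : List (String × List (String × Int))) : String :=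
  if author_ids = [] ∨ stats = [] then "Unknown"
  else
    let present := pvB_present author_ids ⟨stats⟩
    if present.any (fun s => pvB_meets s 1000 50) then "Established"
    else if present.any (fun s => pvB_meets s 100 10) then "Emerging"
    else "Unknown"

-- ===== PRECONDITION & SPEC =====
-- Pre_ excludes the inputs on which Python A raises KeyError: an author whose (truthy) stats entry
-- lacks "cited_by_count" or "works_count". It is stated uniformly over all authors (closed form),
-- so it also excludes a few inputs where A happens to return "Established" before reaching a broken
-- entry; B returns the same value there.
def Pre_compute_author_seniority (author_ids : List String) (stats : List (String × List (String × Int))) : Prop :=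
  (author_ids.all (fun aid =>
    match (PySem.Dict.mk stats).get? aid with
    | none => true
    | some s => s.isEmpty || ((PySem.Dict.mk s).contains "cited_by_count" && (PySem.Dict.mk s).contains "works_count"))) = true
instance (author_ids : List String) (stats : List (String × List (String × Int))) : Decidable (Pre_compute_author_seniority author_ids stats) := by unfold Pre_compute_author_seniority; infer_instance

def pvWitness_compute_author_seniority : List String × (List (String × List (String × Int))) :=
  (["a", "b"], [("a", [("cited_by_count", 500), ("works_count", 12)]), ("c", [])])

def Spec_compute_author_seniority (author_ids : List String) (stats : List (String × List (String × Int))) (out : String) : Prop := out = compute_author_seniority_alt author_ids stats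
instance (author_ids : List String) (stats : List (String × List (String × Int))) (out : String) : Decidable (Spec_compute_author_seniority author_ids stats out) := by unfold Spec_compute_author_seniority; infer_instance

-- ===== CLAIM (what is proved, stated in full; the proofs are below) =====
def Claim_equal_compute_author_seniority : Prop := ∀ (author_ids : List String) (stats : List (String × List (String × Int))), Dom_compute_author_seniority author_ids stats → Pre_compute_author_seniority author_ids stats → Spec_compute_author_seniority author_ids stats (compute_author_seniority author_ids stats)

-- ===== LEMMAS AND PROOFS =====

-- A's loop, for ANY carried 'best', computes B's two-scan answer (with 'best' as the fallback).
theorem pvA_loop_eq (stats : PySem.Dict String (List (String × Int))) (ids : List String) (best : String) :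
    pvA_loop stats ids best =
      (if (pvB_present ids stats).any (fun s => pvB_meets s 1000 50) then "Established"
       else if (pvB_present ids stats).any (fun s => pvB_meets s 100 10) then "Emerging"
       else best) := by
  induction ids generalizing best with
  | nil => simp [pvA_loop, pvB_present]
  | cons aid rest ih =>
    have hpres : ∀ tl, pvB_present (aid :: tl) stats =
        (match stats.get? aid with
         | some s => if s = [] then none else some s
         | none => none).toList ++ pvB_present tl stats := by
      intro tl
      simp [pvB_present, List.filterMap_cons]
      cases stats.get? aid with
      | none => simp
      | some s => by_cases hs : s = [] <;> simp [hs]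
    rw [pvA_loop]
    cases h : stats.get? aid with
    | none => rw [ih best]; simp [hpres, h]
    | some s =>
      by_cases hs : s = []
      · simp only [hs]
        rw [ih best]; simp [hpres, h, hs]
      · simp only [if_neg hs]
        by_cases hE : (PySem.Dict.getD ⟨s⟩ "cited_by_count" 0 ≥ (1000:Int)) ∨ (PySem.Dict.getD ⟨s⟩ "works_count" 0 ≥ (50:Int))
        · have hmeet : pvB_meets s 1000 50 = true := by
            simp [pvB_meets]
            rcases hE with h1 | h1
            · exact Or.inl h1
            · exact Or.inr h1
          simp [hE, hpres, h, hs, hmeet]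
        · push Not at hE
          have hmeet : pvB_meets s 1000 50 = false := by
            simp [pvB_meets]; omega
          by_cases hM : (PySem.Dict.getD ⟨s⟩ "cited_by_count" 0 ≥ (100:Int)) ∨ (PySem.Dict.getD ⟨s⟩ "works_count" 0 ≥ (10:Int))
          · have hmeet2 : pvB_meets s 100 10 = true := by
              simp [pvB_meets]
              rcases hM with h1 | h1
              · exact Or.inl h1
              · exact Or.inr h1
            rw [if_neg (by omega), if_pos hM, ih "Emerging"]
            simp [hpres, h, hs, hmeet, hmeet2]
          · push Not at hM
            have hmeet2 : pvB_meets s 100 10 = false := by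
              simp [pvB_meets]; omega
            rw [if_neg (by omega), if_neg (by omega), ih best]
            simp [hpres, h, hs, hmeet, hmeet2]

-- ===== VERDICT (by name: the statement is the Claim_ definition above) =====
theorem compute_author_seniority_spec : Claim_equal_compute_author_seniority := by
  intro author_ids stats _ _
  unfold Spec_compute_author_seniority compute_author_seniority compute_author_seniority_alt
  by_cases h : author_ids = [] ∨ stats = []
  · simp [h]
  · simp only [h, if_false]
    exact pvA_loop_eq ⟨stats⟩ author_ids "Unknown"
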